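-- pv_equiv track=rewrite | github.com/abharath309/Bharath_PythonC-_Code | Python/w2c_addinghalf.py | HalfToFloat
-- ===== SOURCE A (Python) =====
-- def HalfToFloat(h):
--     s = int((h >> 15) & 0x00000001)    # sign
--     print (s)
--     e = int((h >> 10) & 0x0000001f)    # exponent
--     f = int(h & 0x000003ff)            # fraction
--
--     if e == 0:
--        if f == 0:
--           return int(s << 31)
--        else:
--           while not (f & 0x00000400):
--              f <<= 1
--              e -= 1
--           e += 1
--           f &= ~0x00000400
--           print (s,e,f)
--     elif e == 31:
--        if f == 0:
--           return int((s << 31) | 0x7f800000)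
--        else:
--           return int((s << 31) | 0x7f800000 | (f << 13))
--
--     e = e + (127 -15)
--     f = f << 13
--
--     return int((s << 31) | (e << 23) | f)
-- ===== SOURCE B (Python) =====
-- def HalfToFloat(h):
--     s = (h >> 15) & 1
--     print (s)
--     e = (h >> 10) & 0x1f
--     f = h & 0x3ff
--     if e == 31:
--         return (s << 31) | 0x7f800000 | (f << 13)
--     if e == 0:
--         if f == 0:
--             return s << 31
--         # closed-form subnormal normalization instead of the shift-one-bit-at-a-time loop
--         sh = 11 - f.bit_length()
--         e = 1 - sh
--         f = (f << sh) & 0x3ff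
--         print (s, e, f)
--     return (s << 31) | ((e + 112) << 23) | (f << 13)
-- ===== Notes on version B (the rewrite author's own statement) =====
-- stated objective: simpler
-- what changed: The subnormal case's shift-one-bit-at-a-time while-loop (with its running exponent decrement) is replaced by a closed-form shift count computed from f.bit_length(), with the exponent set directly from that count; sign/exponent/fraction extraction, both prints and the final bit assembly are unchanged.
import Mathlib
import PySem

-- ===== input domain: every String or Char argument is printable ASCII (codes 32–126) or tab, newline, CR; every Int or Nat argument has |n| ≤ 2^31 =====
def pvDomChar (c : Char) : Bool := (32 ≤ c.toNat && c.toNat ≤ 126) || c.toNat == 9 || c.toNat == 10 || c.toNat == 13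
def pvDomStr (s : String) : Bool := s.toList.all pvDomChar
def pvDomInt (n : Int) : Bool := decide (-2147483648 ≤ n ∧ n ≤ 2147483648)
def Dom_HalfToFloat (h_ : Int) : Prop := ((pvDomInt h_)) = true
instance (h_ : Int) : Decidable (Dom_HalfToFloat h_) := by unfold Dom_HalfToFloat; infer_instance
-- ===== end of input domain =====

-- B replaces A's shift-one-bit-at-a-time subnormal while-loop by a closed-form shift count
-- from bit_length (objective: simpler). Return-value equivalence only; both programs print
-- the same lines (B reproduces A's prints verbatim).

-- ===== PORT A =====
-- while not (f & 0x00000400): f <<= 1; e -= 1   — the test 'f & 0x400 == 0' is ported as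
-- '(f // 1024) % 2 == 0' (exact for every int); fuel 11 bounds the iterations: the loop is
-- only entered with 1 ≤ f ≤ 1023, and f doubles each step, reaching bit 10 within 10 steps.
def halfLoopA : Nat → Int × Int → Int × Int
  | 0, fe => fe
  | fuel + 1, (f, e) =>
    if PySem.Int.mod (PySem.Int.floordiv f 1024) 2 = 0 then
      halfLoopA fuel (f * 2, e - 1)
    else (f, e)

-- Bit ops on ints are ported arithmetically, each exactly: '(h >> k) & (2^j - 1)' =
-- '(h // 2^k) % 2^j' (any int h); 'f &= ~0x400' = 'f % 1024' (here 0 ≤ f < 2048);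
-- '<< k' = '* 2^k'; and '|' of the disjoint bit fields s<<31, e<<23 (0 ≤ e < 256),
-- f<<13 (0 ≤ f < 1024) is their sum.
def HalfToFloat (h_ : Int) : Int :=
  let s := PySem.Int.mod (PySem.Int.floordiv h_ 32768) 2    -- s = (h >> 15) & 0x1
  let e := PySem.Int.mod (PySem.Int.floordiv h_ 1024) 32    -- e = (h >> 10) & 0x1f
  let f := PySem.Int.mod h_ 1024                            -- f = h & 0x3ff
  if e = 0 then
    if f = 0 then s * 2147483648                            -- s << 31
    else
      let fe := halfLoopA 11 (f, e)                         -- the while-loop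
      let e2 := fe.2 + 1
      let f2 := PySem.Int.mod fe.1 1024                     -- f &= ~0x400
      s * 2147483648 + (e2 + 112) * 8388608 + f2 * 8192     -- (s<<31)|((e+112)<<23)|(f<<13)
  else if e = 31 then
    if f = 0 then s * 2147483648 + 2139095040               -- (s<<31) | 0x7f800000
    else s * 2147483648 + 2139095040 + f * 8192             -- (s<<31) | 0x7f800000 | (f<<13)
  else
    s * 2147483648 + (e + 112) * 8388608 + f * 8192

-- ===== PORT B =====
-- same arithmetic porting of the bit ops as in port A (each exact as noted there)
def HalfToFloat_alt (h_ : Int) : Int :=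
  let s := PySem.Int.mod (PySem.Int.floordiv h_ 32768) 2    -- s = (h >> 15) & 1
  let e := PySem.Int.mod (PySem.Int.floordiv h_ 1024) 32    -- e = (h >> 10) & 0x1f
  let f := PySem.Int.mod h_ 1024                            -- f = h & 0x3ff
  if e = 31 then s * 2147483648 + 2139095040 + f * 8192
  else if e = 0 then
    if f = 0 then s * 2147483648
    else
      let sh := 11 - PySem.Int.bitLength f                  -- sh = 11 - f.bit_length()
      s * 2147483648 + ((1 - (sh : Int)) + 112) * 8388608
        + (PySem.Int.mod (f * 2 ^ sh) 1024) * 8192          -- e = 1-sh; f = (f<<sh)&0x3ff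
  else s * 2147483648 + ((e + 112)) * 8388608 + f * 8192

-- ===== PRECONDITION & SPEC =====
def Spec_HalfToFloat (h_ : Int) (out : Int) : Prop := out = HalfToFloat_alt h_
instance (h_ : Int) (out : Int) : Decidable (Spec_HalfToFloat h_ out) := by unfold Spec_HalfToFloat; infer_instance

-- ===== CLAIM (what is proved, stated in full; the proofs are below) =====
def Claim_equal_HalfToFloat : Prop := ∀ (h_ : Int), Dom_HalfToFloat h_ → Spec_HalfToFloat h_ (HalfToFloat h_)

-- ===== LEMMAS AND PROOFS =====

-- The loop invariant: with k = 11 - bit_length f shifts still needed, enough fuel, the loop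
-- returns (f * 2^k, e - k).
theorem halfLoopA_closed (k : Nat) : ∀ (fuel : Nat), k < fuel → ∀ (f e : Int), 0 < f →
    PySem.Int.bitLength f = 11 - k → k ≤ 10 →
    halfLoopA fuel (f, e) = (f * 2 ^ k, e - k) := by
  induction k with
  | zero =>
    intro fuel hfuel f e hf hbl _
    obtain ⟨fuel, rfl⟩ : ∃ m, fuel = m + 1 := ⟨fuel - 1, by omega⟩
    have h1 : 2 ^ (11 - 1) ≤ f.natAbs := by
      have := PySem.Int.two_pow_bitLength_le f (by omega)
      simpa [hbl] using this
    have h2 : f.natAbs < 2 ^ 11 := by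
      have := PySem.Int.lt_two_pow_bitLength f
      simpa [hbl] using this
    have hlo : (1024 : Int) ≤ f := by omega
    have hhi : f < 2048 := by omega
    have hdiv : PySem.Int.floordiv f 1024 = 1 := by
      rw [PySem.Int.floordiv_eq_iff_of_pos (by norm_num)]; omega
    have hmod : PySem.Int.mod (PySem.Int.floordiv f 1024) 2 = 1 := by rw [hdiv]; decide
    simp only [halfLoopA]
    rw [hmod]
    norm_num
  | succ k ih =>
    intro fuel hfuel f e hf hbl hk
    obtain ⟨fuel, rfl⟩ : ∃ m, fuel = m + 1 := ⟨fuel - 1, by omega⟩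
    have h2 : f.natAbs < 2 ^ (11 - (k + 1)) := by
      have := PySem.Int.lt_two_pow_bitLength f
      simpa [hbl] using this
    have hsmall : f < 1024 := by
      have : (2:Nat) ^ (11 - (k+1)) ≤ 2 ^ 10 := Nat.pow_le_pow_right (by norm_num) (by omega)
      omega
    have hdiv : PySem.Int.floordiv f 1024 = 0 := by
      rw [PySem.Int.floordiv_eq_iff_of_pos (by norm_num)]; omega
    have hbl2 : PySem.Int.bitLength (f * 2) = 11 - k := by
      have hstep := PySem.Int.bitLength_of_pos (show (0:Int) < f * 2 by omega)
      have hfd : PySem.Int.floordiv (f * 2) 2 = f := by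
        rw [PySem.Int.floordiv_eq_iff_of_pos (by norm_num)]; omega
      rw [hstep, hfd, hbl]; omega
    have hrec := ih fuel (by omega) (f * 2) (e - 1) (by omega) hbl2 (by omega)
    have hmod : PySem.Int.mod (PySem.Int.floordiv f 1024) 2 = 0 := by rw [hdiv]; decide
    simp only [halfLoopA]
    rw [hmod]
    rw [if_pos rfl, hrec, Prod.mk.injEq]
    refine ⟨by rw [pow_succ]; ring, by push_cast; ring⟩
-- ===== VERDICT (by name: the statement is the Claim_ definition above) =====
theorem HalfToFloat_spec : Claim_equal_HalfToFloat := by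
  intro h _
  unfold Spec_HalfToFloat HalfToFloat HalfToFloat_alt
  set s := PySem.Int.mod (PySem.Int.floordiv h 32768) 2 with hs
  set e := PySem.Int.mod (PySem.Int.floordiv h 1024) 32 with he
  set f := PySem.Int.mod h 1024 with hf
  have hf0 : 0 ≤ f ∧ f < 1024 := by
    rw [hf, PySem.Int.mod_eq_emod_of_pos (by norm_num)]
    exact ⟨Int.emod_nonneg _ (by norm_num), Int.emod_lt_of_pos _ (by norm_num)⟩
  by_cases he0 : e = 0
  · by_cases hff : f = 0
    · simp [he0, hff]
    · -- subnormal: apply the loop lemma with k = 11 - bit_length f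
      have hfpos : 0 < f := lt_of_le_of_ne hf0.1 (Ne.symm hff)
      have hble : PySem.Int.bitLength f ≤ 10 := by
        by_contra hgt
        have := PySem.Int.two_pow_bitLength_le f (by omega)
        have h11 : (2:Nat) ^ 10 ≤ 2 ^ (PySem.Int.bitLength f - 1) :=
          Nat.pow_le_pow_right (by norm_num) (by omega)
        omega
      have hblpos : 1 ≤ PySem.Int.bitLength f := by
        by_contra hlt
        have hbl0 : PySem.Int.bitLength f = 0 := by omega
        have := PySem.Int.lt_two_pow_bitLength f
        rw [hbl0] at this
        omega
      set k : Nat := 11 - PySem.Int.bitLength f with hk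
      have hbl : PySem.Int.bitLength f = 11 - k := by omega
      have hloop := halfLoopA_closed k 11 (by omega) f e hfpos hbl (by omega)
      rw [he0] at hloop
      rw [he0]
      simp only [hff]
      norm_num
      rw [hloop]
      rw [hk]
      push_cast
      ring
  · by_cases he31 : e = 31
    · simp [he31]
    · simp [he0, he31]
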